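-- pv_equiv track=rewrite | github.com/Shoaib-mdr/3D-Rotation-Translation-Scaling-Reflection- | Reflection_3D.py | reflection
-- ===== SOURCE A (Python) =====
-- def reflection(x,y,z):
-- 	ReflectionY=   [[1, 0, 0, 0],
-- 		 [0, -1, 0, 0],
-- 		 [0, 0, 1, 0],
-- 		 [0, 0, 0, 1]]
--
-- 	P =     [[x],
-- 		[y],
-- 		[z],
-- 		[1]]
--
-- 	resulty= [[0],
-- 	  	 [0],
-- 	   	 [0],
-- 		 [0]]
-- 	for i in range(len(ReflectionY)):
-- 		for j in range(len(P[0])):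
-- 			for k in range(len(P)):
-- 				resulty[i][j] += ReflectionY[i][k] * P[k][j]
-- 	return resulty[0][0],resulty[1][0],resulty[2][0]
-- ===== SOURCE B (Python) =====
-- def reflection(x, y, z):
--     # Reflection across the Y plane is just negating the y-coordinate.
--     return (x, -y, z)
-- ===== Notes on version B (the rewrite author's own statement) =====
-- stated objective: simpler
-- what changed: Replaces the 4x4 homogeneous matrix, column vector and triple accumulation loop with the closed form (x, -y, z).
import Mathlib
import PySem

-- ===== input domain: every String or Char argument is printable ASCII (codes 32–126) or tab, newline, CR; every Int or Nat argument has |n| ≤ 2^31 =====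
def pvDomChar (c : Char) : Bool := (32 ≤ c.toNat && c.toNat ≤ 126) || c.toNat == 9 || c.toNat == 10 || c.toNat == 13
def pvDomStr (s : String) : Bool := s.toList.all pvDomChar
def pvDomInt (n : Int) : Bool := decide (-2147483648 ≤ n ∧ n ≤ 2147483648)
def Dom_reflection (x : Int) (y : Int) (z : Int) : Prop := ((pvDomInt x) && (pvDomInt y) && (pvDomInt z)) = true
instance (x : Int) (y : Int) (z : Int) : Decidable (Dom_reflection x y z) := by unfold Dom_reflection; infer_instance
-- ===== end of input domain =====

-- B drops the homogeneous matrix and triple accumulation loop for the closed form (x, -y, z); objective: simpler.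

-- ===== PORT A =====
-- matrix cell read m[i][j] with Nat indices (all loop indices come from range(...) and are in range, so this is exact)
def pvCell (m : List (List Int)) (i j : Nat) : Int := (m.getD i []).getD j 0
-- in-place 'resulty[i][j] += v' (indices in range, so exact)
def pvBump (m : List (List Int)) (i j : Nat) (v : Int) : List (List Int) :=
  m.set i ((m.getD i []).set j (pvCell m i j + v))

def reflection (x : Int) (y : Int) (z : Int) : Int × Int × Int :=
  let reflY : List (List Int) := [[1, 0, 0, 0], [0, -1, 0, 0], [0, 0, 1, 0], [0, 0, 0, 1]]
  let P : List (List Int) := [[x], [y], [z], [1]]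
  let resulty0 : List (List Int) := [[0], [0], [0], [0]]
  let resulty :=
    (List.range reflY.length).foldl (fun r i =>
      (List.range (P.getD 0 []).length).foldl (fun r j =>
        (List.range P.length).foldl (fun r k =>
          pvBump r i j (pvCell reflY i k * pvCell P k j)) r) r) resulty0
  (pvCell resulty 0 0, pvCell resulty 1 0, pvCell resulty 2 0)

-- ===== PORT B =====
def reflection_alt (x : Int) (y : Int) (z : Int) : Int × Int × Int := (x, -y, z)

-- ===== PRECONDITION & SPEC =====
def Spec_reflection (x : Int) (y : Int) (z : Int) (out : Int × Int × Int) : Prop := out = reflection_alt x y z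
instance (x : Int) (y : Int) (z : Int) (out : Int × Int × Int) : Decidable (Spec_reflection x y z out) := by unfold Spec_reflection; infer_instance

-- ===== CLAIM (what is proved, stated in full; the proofs are below) =====
def Claim_equal_reflection : Prop := ∀ (x : Int) (y : Int) (z : Int), Dom_reflection x y z → Spec_reflection x y z (reflection x y z)

-- ===== LEMMAS AND PROOFS =====

-- ===== VERDICT (by name: the statement is the Claim_ definition above) =====
theorem reflection_spec : Claim_equal_reflection := by
  intro x y z _
  unfold Spec_reflection reflection reflection_alt
  simp [List.range_succ, pvBump, pvCell]
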